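-- pv_equiv track=rewrite | github.com/JunRain2/algorithm | python/게으른_백곰.py | sum_ice
-- ===== SOURCE A (Python) =====
-- def sum_ice(k, positions):
--     max_key = max(positions.keys())
--     min_key = min(positions.keys())
--     arr = [0] * (max_key + 1)
--
--     for key in positions.keys():
--         value = positions[key]
--         arr[key] = arr[key] + value
--
--         for i in range(1, k + 1):
--             if (key - i) > min_key:
--                 arr[key - i] = arr[key - i] + value
--             if (key + i) < max_key:
--                 arr[key + i] = arr[key + i] + value
--
--     return arr
-- ===== SOURCE B (Python) =====
-- def sum_ice(k, positions):
--     max_key = max(positions)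
--     min_key = min(positions)
--     diff = [0] * (max_key + 2)
--
--     def add(lo, hi, v):
--         if lo <= hi:
--             diff[lo] += v
--             diff[hi + 1] -= v
--
--     for key, value in positions.items():
--         add(key, key, value)
--         add(max(min_key + 1, key - k), key - 1, value)
--         add(key + 1, min(max_key - 1, key + k), value)
--
--     out = []
--     s = 0
--     for d in diff[:max_key + 1]:
--         s += d
--         out.append(s)
--     return out
-- ===== Notes on version B (the rewrite author's own statement) =====
-- stated objective: faster
-- what changed: Replaces A's per-key scatter loop over range(1, k+1) by a difference array updated with three O(1) range updates per key and finished with one prefix-sum pass.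
-- outside the precondition, e.g. on sum_ice(0, {-1: 5, 2: 3}): A returns [0, 0, 8], B returns [-5, -5, -2]
import Mathlib
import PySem

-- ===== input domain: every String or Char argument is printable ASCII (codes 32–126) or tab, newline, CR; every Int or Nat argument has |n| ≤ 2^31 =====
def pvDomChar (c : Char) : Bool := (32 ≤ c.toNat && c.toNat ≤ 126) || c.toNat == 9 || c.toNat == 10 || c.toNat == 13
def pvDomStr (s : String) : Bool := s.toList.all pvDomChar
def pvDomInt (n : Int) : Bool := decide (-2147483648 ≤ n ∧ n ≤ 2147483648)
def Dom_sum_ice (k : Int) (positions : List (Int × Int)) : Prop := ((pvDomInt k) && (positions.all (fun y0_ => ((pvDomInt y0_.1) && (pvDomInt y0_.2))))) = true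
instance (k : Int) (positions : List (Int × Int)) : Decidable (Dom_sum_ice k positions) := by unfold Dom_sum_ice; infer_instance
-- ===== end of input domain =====

-- B replaces A's per-key scatter loop over range(1, k+1) by a difference array with one
-- prefix-sum pass (O(n + max_key) instead of O(n*k + max_key)); return values proved equal on Pre_.

-- ===== PORT A =====
-- inner 'for i in range(1, k+1)' body; pySetD/pyGetD are exact here: under Pre_ every touched
-- index is nonnegative and in range, so the total forms coincide with Python's arr[..]
def sumIceInner (mn mx key value : Int) (arr : List Int) (i : Int) : List Int :=
  let arr := if mn < key - i then
    PySem.List.pySetD arr (key - i) (PySem.List.pyGetD arr (key - i) 0 + value) else arr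
  if key + i < mx then
    PySem.List.pySetD arr (key + i) (PySem.List.pyGetD arr (key + i) 0 + value) else arr

-- body of 'for key in positions.keys()'; the .getD 0 on the dict lookup never fires (key ∈ keys)
def sumIceStep (k mn mx : Int) (positions : List (Int × Int)) (arr : List Int) (key : Int) : List Int :=
  let value := ((PySem.Dict.mk positions).get? key).getD 0
  let arr := PySem.List.pySetD arr key (PySem.List.pyGetD arr key 0 + value)
  (PySem.List.pyRange 1 (k + 1) 1).foldl (sumIceInner mn mx key value) arr

def sum_ice (k : Int) (positions : List (Int × Int)) : List Int :=
  let keys := positions.map Prod.fst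
  let max_key := (PySem.List.max? keys (fun x => x)).getD 0   -- .getD 0 never fires: keys ≠ [] under Pre_
  let min_key := (PySem.List.min? keys (fun x => x)).getD 0
  let arr := List.replicate (max_key + 1).toNat (0 : Int)
  keys.foldl (sumIceStep k min_key max_key positions) arr

-- ===== PORT B =====
-- helper 'add(lo, hi, v)' of Source B: range update on the difference array
def sumIceAdd (diff : List Int) (lo hi v : Int) : List Int :=
  if lo ≤ hi then
    let diff := PySem.List.pySetD diff lo (PySem.List.pyGetD diff lo 0 + v)
    PySem.List.pySetD diff (hi + 1) (PySem.List.pyGetD diff (hi + 1) 0 - v)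
  else diff

-- body of 'for key, value in positions.items()'
def sumIceScatter (k mn mx : Int) (diff : List Int) (kv : Int × Int) : List Int :=
  let diff := sumIceAdd diff kv.1 kv.1 kv.2
  let diff := sumIceAdd diff (max (mn + 1) (kv.1 - k)) (kv.1 - 1) kv.2
  sumIceAdd diff (kv.1 + 1) (min (mx - 1) (kv.1 + k)) kv.2

def sum_ice_alt (k : Int) (positions : List (Int × Int)) : List Int :=
  let max_key := (PySem.List.max? (positions.map Prod.fst) (fun x => x)).getD 0
  let min_key := (PySem.List.min? (positions.map Prod.fst) (fun x => x)).getD 0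
  let diff := List.replicate (max_key + 2).toNat (0 : Int)
  let diff := positions.foldl (sumIceScatter k min_key max_key) diff
  ((PySem.List.slice diff none (some (max_key + 1))).foldl
    (fun sa d => (sa.1 + d, sa.2 ++ [sa.1 + d])) ((0 : Int), ([] : List Int))).2

-- ===== PRECONDITION & SPEC =====
-- Pre_ excludes: the empty dict (A raises ValueError on max([])); association lists with
-- duplicate keys (they represent no Python dict); and dicts with a negative key — negative
-- positions are outside the task's natural domain, and there A either raises IndexError or
-- returns values placed by Python's negative-index wraparound, which B does not reproduce.
def Pre_sum_ice (k : Int) (positions : List (Int × Int)) : Prop :=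
  positions ≠ [] ∧ (positions.map Prod.fst).Nodup ∧ ∀ p ∈ positions, 0 ≤ p.1
instance (k : Int) (positions : List (Int × Int)) : Decidable (Pre_sum_ice k positions) := by
  unfold Pre_sum_ice; infer_instance

def pvWitness_sum_ice : Int × (List (Int × Int)) := (2, [(0, 3), (2, 1), (5, -4)])

def Spec_sum_ice (k : Int) (positions : List (Int × Int)) (out : List Int) : Prop := out = sum_ice_alt k positions
instance (k : Int) (positions : List (Int × Int)) (out : List Int) : Decidable (Spec_sum_ice k positions out) := by unfold Spec_sum_ice; infer_instance

-- ===== CLAIM (what is proved, stated in full; the proofs are below) =====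
def Claim_equal_sum_ice : Prop := ∀ (k : Int) (positions : List (Int × Int)), Dom_sum_ice k positions → Pre_sum_ice k positions → Spec_sum_ice k positions (sum_ice k positions)

-- ===== LEMMAS AND PROOFS =====
-- value read/write on the array, Int indices
theorem at_set (arr : List Int) (i j v : Int) (h0 : 0 ≤ i) (h1 : i < arr.length) (hj : 0 ≤ j) :
    PySem.List.pyGetD (PySem.List.pySetD arr i v) j 0
      = if j = i then v else PySem.List.pyGetD arr j 0 := by
  rw [PySem.List.pySetD_of_nonneg arr v h0]
  rcases Int.eq_ofNat_of_zero_le h0 with ⟨n, rfl⟩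
  rcases Int.eq_ofNat_of_zero_le hj with ⟨m, rfl⟩
  have hn : n < arr.length := by exact_mod_cast h1
  simp only [Int.toNat_natCast, PySem.List.pyGetD_natCast, List.getD_eq_getElem?_getD,
    List.getElem?_set]
  by_cases h : m = n
  · subst h; simp [hn]
  · have : ¬ ((m : Int) = n) := by exact_mod_cast h
    simp [Ne.symm h, this]

theorem sum_take_set (l : List Int) (n : Nat) (m : Nat) (w : Int) (h : n < l.length) :
    ((l.set n (l.getD n 0 + w)).take m).sum = (l.take m).sum + (if n < m then w else 0) := by
  induction l generalizing n m with
  | nil => simp at h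
  | cons x xs ih =>
    cases n with
    | zero =>
      cases m with
      | zero => simp
      | succ m => simp [List.getD]; ring
    | succ n =>
      cases m with
      | zero => simp
      | succ m =>
        simp only [List.set_cons_succ, List.take_succ_cons, List.sum_cons,
          List.getD_cons_succ]
        rw [ih n m (by simpa using h)]
        by_cases hc : n < m
        · simp [hc]; ring
        · simp [hc]

theorem length_inner (mn mx key value : Int) (arr : List Int) (i : Int) :
    (sumIceInner mn mx key value arr i).length = arr.length := by
  unfold sumIceInner
  split_ifs <;> simp [PySem.List.length_pySetD]

theorem length_innerfold (mn mx key value : Int) (l : List Int) (arr : List Int) :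
    (l.foldl (sumIceInner mn mx key value) arr).length = arr.length := by
  induction l generalizing arr with
  | nil => rfl
  | cons x t ih => simp [List.foldl_cons, ih, length_inner]

theorem length_step (k mn mx key : Int) (positions : List (Int × Int)) (arr : List Int) :
    (sumIceStep k mn mx positions arr key).length = arr.length := by
  unfold sumIceStep
  simp [length_innerfold, PySem.List.length_pySetD]

theorem length_stepfold (k mn mx : Int) (positions ps : List (Int × Int)) (arr : List Int) :
    (ps.foldl (fun a p => sumIceStep k mn mx positions a p.1) arr).length = arr.length := by
  induction ps generalizing arr with
  | nil => rfl
  | cons x t ih => simp [List.foldl_cons, ih, length_step]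

theorem length_add (diff : List Int) (lo hi v : Int) :
    (sumIceAdd diff lo hi v).length = diff.length := by
  simp only [sumIceAdd]
  split_ifs <;> simp [PySem.List.length_pySetD]

theorem length_scatter (k mn mx : Int) (diff : List Int) (kv : Int × Int) :
    (sumIceScatter k mn mx diff kv).length = diff.length := by
  simp only [sumIceScatter]
  simp [length_add]

theorem length_scatterfold (k mn mx : Int) (ps : List (Int × Int)) (diff : List Int) :
    (ps.foldl (sumIceScatter k mn mx) diff).length = diff.length := by
  induction ps generalizing diff with
  | nil => rfl
  | cons x t ih => simp [List.foldl_cons, ih, length_scatter]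

theorem inner_effect (mn mx key value : Int) (arr : List Int) (i j : Int)
    (hmn : 0 ≤ mn) (hkey : 0 ≤ key) (hkmx : key ≤ mx) (hlen : (arr.length : Int) = mx + 1)
    (hi : 1 ≤ i) (hj : 0 ≤ j) :
    PySem.List.pyGetD (sumIceInner mn mx key value arr i) j 0
      = PySem.List.pyGetD arr j 0 + (if j = key - i ∧ mn < j then value else 0)
        + (if j = key + i ∧ j < mx then value else 0) := by
  unfold sumIceInner
  have hne : key - i ≠ key + i := by omega
  by_cases g1 : mn < key - i
  · by_cases g2 : key + i < mx
    · rw [if_pos g1, if_pos g2]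
      rw [at_set _ _ _ _ (by omega) (by rw [PySem.List.length_pySetD]; omega) hj]
      rw [at_set _ _ _ _ (by omega) (by omega) hj]
      rw [at_set _ _ _ _ (by omega) (by omega) (by omega : (0:Int) ≤ key + i)]
      by_cases hj2 : j = key + i
      · subst hj2; split_ifs <;> omega
      · by_cases hj1 : j = key - i
        · subst hj1; split_ifs <;> omega
        · split_ifs <;> omega
    · rw [if_pos g1, if_neg g2]
      rw [at_set _ _ _ _ (by omega) (by omega) hj]
      by_cases hj1 : j = key - i
      · subst hj1; split_ifs <;> omega
      · split_ifs <;> omega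
  · by_cases g2 : key + i < mx
    · rw [if_neg g1, if_pos g2]
      rw [at_set _ _ _ _ (by omega) (by omega) hj]
      by_cases hj2 : j = key + i
      · subst hj2; split_ifs <;> omega
      · split_ifs <;> omega
    · rw [if_neg g1, if_neg g2]
      split_ifs <;> omega

theorem innerfold_effect (mn mx key value : Int) (arr : List Int) (n : Nat) (j : Int)
    (hmn : 0 ≤ mn) (hkey : 0 ≤ key) (hkmx : key ≤ mx) (hlen : (arr.length : Int) = mx + 1)
    (hj : 0 ≤ j) :
    PySem.List.pyGetD ((PySem.List.pyRange 1 ((n : Int) + 1)).foldl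
        (sumIceInner mn mx key value) arr) j 0
      = PySem.List.pyGetD arr j 0
        + (if mn < j ∧ key - n ≤ j ∧ j ≤ key - 1 then value else 0)
        + (if j < mx ∧ key + 1 ≤ j ∧ j ≤ key + n then value else 0) := by
  induction n generalizing arr with
  | zero =>
    rw [PySem.List.pyRange_one_eq_nil (by omega)]
    simp only [List.foldl_nil]
    split_ifs <;> omega
  | succ n ih =>
    have h1 : ((n : Int) + 1) + 1 = ((n + 1 : Nat) : Int) + 1 := by push_cast; ring
    rw [← h1, PySem.List.pyRange_one_succ_right (by omega), List.foldl_append]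
    simp only [List.foldl_cons, List.foldl_nil]
    rw [inner_effect mn mx key value _ _ j hmn hkey hkmx
      (by rw [length_innerfold]; exact hlen) (by omega) hj]
    rw [ih arr hlen]
    by_cases hj1 : j = key - ((n : Int) + 1)
    · subst hj1; split_ifs <;> omega
    · by_cases hj2 : j = key + ((n : Int) + 1)
      · subst hj2; split_ifs <;> omega
      · split_ifs <;> omega

theorem step_effect (k mn mx key value : Int) (positions : List (Int × Int)) (arr : List Int)
    (j : Int) (hmn : 0 ≤ mn) (hkey : 0 ≤ key) (hkmx : key ≤ mx)
    (hlen : (arr.length : Int) = mx + 1) (hj : 0 ≤ j)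
    (hv : ((PySem.Dict.mk positions).get? key).getD 0 = value) :
    PySem.List.pyGetD (sumIceStep k mn mx positions arr key) j 0
      = PySem.List.pyGetD arr j 0 + (if j = key then value else 0)
        + (if mn < j ∧ key - k ≤ j ∧ j ≤ key - 1 then value else 0)
        + (if j < mx ∧ key + 1 ≤ j ∧ j ≤ key + k then value else 0) := by
  simp only [sumIceStep]
  rw [hv]
  by_cases hk : k ≤ 0
  · rw [PySem.List.pyRange_one_eq_nil (by omega), List.foldl_nil]
    rw [at_set _ _ _ _ hkey (by omega) hj]
    by_cases hjk : j = key
    · subst hjk; split_ifs <;> omega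
    · split_ifs <;> omega
  · have hkn : k = ((k.toNat : Nat) : Int) := by omega
    rw [hkn]
    rw [innerfold_effect mn mx key value _ k.toNat j hmn hkey hkmx
      (by rw [PySem.List.length_pySetD]; exact hlen) hj]
    rw [at_set _ _ _ _ hkey (by omega) hj]
    by_cases hjk : j = key
    · subst hjk; split_ifs <;> omega
    · split_ifs <;> omega

theorem sum_take_setI (l : List Int) (i : Int) (w : Int) (m : Nat)
    (h0 : 0 ≤ i) (h : i < (l.length : Int)) :
    ((PySem.List.pySetD l i (PySem.List.pyGetD l i 0 + w)).take m).sum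
      = (l.take m).sum + (if i < (m : Int) then w else 0) := by
  rcases Int.eq_ofNat_of_zero_le h0 with ⟨a, rfl⟩
  rw [PySem.List.pySetD_of_nonneg _ _ h0, PySem.List.pyGetD_natCast]
  simp only [Int.toNat_natCast]
  rw [sum_take_set _ _ _ _ (by exact_mod_cast h)]
  congr 1
  split_ifs with h1 h2 h2
  · rfl
  · omega
  · omega
  · rfl

theorem add_effect (diff : List Int) (lo hi v : Int) (n : Nat)
    (h0 : 0 ≤ lo) (hhi : lo ≤ hi → hi + 1 < (diff.length : Int)) :
    ((sumIceAdd diff lo hi v).take n).sum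
      = (diff.take n).sum + (if lo < (n : Int) ∧ (n : Int) ≤ hi + 1 then v else 0) := by
  simp only [sumIceAdd]
  by_cases hlh : lo ≤ hi
  · have hb := hhi hlh
    rw [if_pos hlh]
    rw [sub_eq_add_neg]
    rw [sum_take_setI _ _ (-v) n (by omega) (by rw [PySem.List.length_pySetD]; omega)]
    rw [sum_take_setI _ _ v n h0 (by omega)]
    split_ifs <;> omega
  · rw [if_neg hlh]
    split_ifs <;> omega

theorem scatter_effect (k mn mx : Int) (diff : List Int) (kv : Int × Int) (j : Nat)
    (hmn : 0 ≤ mn) (hkey : 0 ≤ kv.1) (hkmx : kv.1 ≤ mx) (hld : (diff.length : Int) = mx + 2) :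
    ((sumIceScatter k mn mx diff kv).take (j + 1)).sum
      = (diff.take (j + 1)).sum + (if (j : Int) = kv.1 then kv.2 else 0)
        + (if mn < (j : Int) ∧ kv.1 - k ≤ (j : Int) ∧ (j : Int) ≤ kv.1 - 1 then kv.2 else 0)
        + (if (j : Int) < mx ∧ kv.1 + 1 ≤ (j : Int) ∧ (j : Int) ≤ kv.1 + k then kv.2 else 0) := by
  simp only [sumIceScatter]
  rw [add_effect _ _ _ _ _ (by omega) (by intro h; rw [length_add, length_add]; omega)]
  rw [add_effect _ _ _ _ _ (by omega) (by intro h; rw [length_add]; omega)]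
  rw [add_effect _ _ _ _ _ (by omega) (by intro h; omega)]
  push_cast
  split_ifs <;> omega

theorem scan_snd (l : List Int) (s : Int) (acc : List Int) :
    (l.foldl (fun sa d => (sa.1 + d, sa.2 ++ [sa.1 + d])) (s, acc)).2
      = acc ++ (List.range l.length).map (fun j => s + (l.take (j + 1)).sum) := by
  induction l generalizing s acc with
  | nil => simp
  | cons d t ih =>
    simp only [List.foldl_cons]
    rw [ih]
    simp [List.range_succ_eq_map, List.map_map, Function.comp_def, List.take_succ_cons,
      List.sum_cons, List.append_assoc, add_assoc]

theorem main_ind (k mn mx : Int) (positions : List (Int × Int))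
    (hnod : (positions.map Prod.fst).Nodup) (hmn : 0 ≤ mn)
    (ps : List (Int × Int)) (hsub : ∀ p ∈ ps, p ∈ positions)
    (hb : ∀ p ∈ ps, 0 ≤ p.1 ∧ p.1 ≤ mx)
    (arr diff : List Int) (hla : (arr.length : Int) = mx + 1) (hld : (diff.length : Int) = mx + 2)
    (hinv : ∀ j : Nat, (j : Int) ≤ mx →
      PySem.List.pyGetD arr (j : Int) 0 = (diff.take (j + 1)).sum) :
    ∀ j : Nat, (j : Int) ≤ mx →
      PySem.List.pyGetD (ps.foldl (fun a p => sumIceStep k mn mx positions a p.1) arr) (j : Int) 0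
        = ((ps.foldl (sumIceScatter k mn mx) diff).take (j + 1)).sum := by
  induction ps generalizing arr diff with
  | nil =>
    intro j hj
    simp only [List.foldl_nil]
    exact hinv j hj
  | cons p t ih =>
    intro j hj
    simp only [List.foldl_cons]
    have hmem : p ∈ positions := hsub p (List.mem_cons_self)
    have hvv : (PySem.Dict.mk positions).get? p.1 = some p.2 := by
      apply PySem.Dict.get?_of_mem_items
      · exact hmem
      · simpa [PySem.Dict.keys] using hnod
    have hbp := hb p (List.mem_cons_self)
    refine ih (fun q hq => hsub q (List.mem_cons_of_mem _ hq))
      (fun q hq => hb q (List.mem_cons_of_mem _ hq)) _ _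
      (by rw [length_step]; exact hla) (by rw [length_scatter]; exact hld) ?_ j hj
    intro j' hj'
    rw [step_effect k mn mx p.1 p.2 positions arr _ hmn hbp.1 hbp.2 hla
      (by positivity) (by rw [hvv]; rfl)]
    rw [scatter_effect k mn mx diff p j' hmn hbp.1 hbp.2 hld]
    rw [hinv j' hj']

theorem init_inv (mx : Int) (hmx0 : 0 ≤ mx) : ∀ j : Nat, (j : Int) ≤ mx →
    PySem.List.pyGetD (List.replicate (mx + 1).toNat (0 : Int)) (j : Int) 0
      = ((List.replicate (mx + 2).toNat (0 : Int)).take (j + 1)).sum := by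
  intro j hj
  have hjlt : j < (mx + 1).toNat := by omega
  simp [PySem.List.pyGetD_natCast, List.getD_eq_getElem?_getD, hjlt,
    List.take_replicate, List.sum_replicate]

-- ===== VERDICT (by name: the statement is the Claim_ definition above) =====
theorem sum_ice_spec : Claim_equal_sum_ice := by
  unfold Claim_equal_sum_ice Spec_sum_ice
  intro k positions _hdom hpre
  obtain ⟨hne, hnod, hpos⟩ := hpre
  have hkne : positions.map Prod.fst ≠ [] := by simpa using hne
  obtain ⟨mx, hmx⟩ : ∃ m, PySem.List.max? (positions.map Prod.fst) (fun x => x) = some m := by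
    cases h : PySem.List.max? (positions.map Prod.fst) (fun x => x) with
    | none => exact absurd ((PySem.List.max?_eq_none_iff _ _).1 h) hkne
    | some m => exact ⟨m, rfl⟩
  obtain ⟨mn, hmn⟩ : ∃ m, PySem.List.min? (positions.map Prod.fst) (fun x => x) = some m := by
    cases h : PySem.List.min? (positions.map Prod.fst) (fun x => x) with
    | none => exact absurd ((PySem.List.min?_eq_none_iff _ _).1 h) hkne
    | some m => exact ⟨m, rfl⟩
  have hposk : ∀ x ∈ positions.map Prod.fst, 0 ≤ x := by
    intro x hx
    obtain ⟨p, hp, rfl⟩ := List.mem_map.1 hx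
    exact hpos p hp
  have hmx0 : 0 ≤ mx := hposk _ (PySem.List.max?_mem hmx)
  have hmn0 : 0 ≤ mn := hposk _ (PySem.List.min?_mem hmn)
  have hle : ∀ x ∈ positions.map Prod.fst, x ≤ mx := by
    intro x hx
    simpa using PySem.List.max?_isMax hmx x hx
  simp only [sum_ice, sum_ice_alt, hmx, hmn, Option.getD_some]
  rw [List.foldl_map]
  rw [PySem.List.slice_to _ (by omega)]
  rw [scan_snd]
  simp only [List.nil_append]
  have hNa : ((List.replicate (mx + 1).toNat (0 : Int)).length : Int) = mx + 1 := by
    simp; omega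
  have hNd : ((List.replicate (mx + 2).toNat (0 : Int)).length : Int) = mx + 2 := by
    simp; omega
  have hmain := main_ind k mn mx positions hnod hmn0 positions (fun p hp => hp)
    (fun p hp => ⟨hpos p hp, hle _ (List.mem_map_of_mem hp)⟩)
    (List.replicate (mx + 1).toNat (0 : Int)) (List.replicate (mx + 2).toNat (0 : Int))
    hNa hNd (init_inv mx hmx0)
  have hlarr : (positions.foldl (fun a p => sumIceStep k mn mx positions a p.1)
      (List.replicate (mx + 1).toNat (0 : Int))).length = (mx + 1).toNat := by
    rw [length_stepfold]; simp
  have hldiff : (positions.foldl (sumIceScatter k mn mx)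
      (List.replicate (mx + 2).toNat (0 : Int))).length = (mx + 2).toNat := by
    rw [length_scatterfold]; simp
  apply List.ext_getElem
  · simp only [List.length_map, List.length_range, List.length_take, hlarr, hldiff]
    omega
  · intro i h1 h2
    rw [List.getElem_map, List.getElem_range, List.take_take]
    have hiN : i < (mx + 1).toNat := by rw [hlarr] at h1; exact h1
    have hmin : min (i + 1) (mx + 1).toNat = i + 1 := by omega
    rw [hmin]
    have hi := hmain i (by omega)
    rw [PySem.List.pyGetD_natCast, List.getD_eq_getElem?_getD,
      List.getElem?_eq_getElem h1] at hi
    simpa using hi
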